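-- pv_equiv track=rewrite | github.com/akimgnts/elevia | apps/api/src/apply_pack/generator_v0.py | compute_matched_missing
-- ===== SOURCE A (Python) =====
-- from typing import List, Dict, Any
--
-- def compute_matched_missing(
--     profile_skills: List[str],
--     offer_skills: List[str],
-- ) -> tuple[List[str], List[str]]:
--     """
--     Compute matched and missing skills from profile and offer skill lists.
--     Returns (matched, missing) — both sorted for determinism.
--     """
--     profile_set = {s.lower() for s in profile_skills}
--     offer_set = {s.lower() for s in offer_skills}
--
--     matched = sorted(profile_set & offer_set)
--     missing = sorted(offer_set - profile_set)
--     return matched, missing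
-- ===== SOURCE B (Python) =====
-- def compute_matched_missing(profile_skills, offer_skills):
--     """Single classifying pass over the offer skills (dedup on the fly)
--     instead of building two sets and taking intersection/difference."""
--     profile_set = {s.lower() for s in profile_skills}
--     seen = set()
--     matched = []
--     missing = []
--     for s in offer_skills:
--         t = s.lower()
--         if t not in seen:
--             seen.add(t)
--             if t in profile_set:
--                 matched.append(t)
--             else:
--                 missing.append(t)
--     return sorted(matched), sorted(missing)
-- ===== Notes on version B (the rewrite author's own statement) =====
-- stated objective: alternative
-- what changed: Replaces the two set-algebra operations (intersection and difference of two built sets) by one classifying pass over the offer list that dedups on the fly and appends each new lowered skill to matched or missing.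
import Mathlib
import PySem

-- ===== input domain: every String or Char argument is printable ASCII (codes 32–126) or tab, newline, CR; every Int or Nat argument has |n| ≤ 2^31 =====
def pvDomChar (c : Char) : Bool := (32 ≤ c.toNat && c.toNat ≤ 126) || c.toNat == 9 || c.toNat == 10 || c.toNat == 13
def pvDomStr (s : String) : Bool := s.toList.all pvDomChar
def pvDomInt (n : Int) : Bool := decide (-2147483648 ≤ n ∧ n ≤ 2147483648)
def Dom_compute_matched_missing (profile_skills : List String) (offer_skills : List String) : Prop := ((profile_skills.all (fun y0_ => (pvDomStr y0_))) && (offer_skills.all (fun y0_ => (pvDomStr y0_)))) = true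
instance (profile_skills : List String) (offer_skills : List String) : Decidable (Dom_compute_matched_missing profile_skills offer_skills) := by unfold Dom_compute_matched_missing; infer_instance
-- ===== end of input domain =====

-- B replaces the two set-algebra operations by one classifying pass over the offer list (alternative decomposition, same cost).

-- ===== PORT A =====
def compute_matched_missing (profile_skills : List String) (offer_skills : List String) : List String × List String :=
  let profile_set : PySem.Set String := PySem.Set.ofList (profile_skills.map (fun s => PySem.Str.lower s))
  let offer_set : PySem.Set String := PySem.Set.ofList (offer_skills.map (fun s => PySem.Str.lower s))
  let matched := PySem.List.sorted (PySem.Set.inter profile_set offer_set) (fun x => x) false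
  let missing := PySem.List.sorted (PySem.Set.diff offer_set profile_set) (fun x => x) false
  (matched, missing)

-- ===== PORT B =====
-- loop body of Source B: dedup via `seen`, classify new lowered skill into matched/missing
def pvBStep (profile_set : PySem.Set String)
    (st : PySem.Set String × List String × List String) (s : String) :
    PySem.Set String × List String × List String :=
  let t := PySem.Str.lower s
  if PySem.Set.contains st.1 t then st
  else (PySem.Set.add st.1 t,
        if PySem.Set.contains profile_set t then st.2.1 ++ [t] else st.2.1,
        if PySem.Set.contains profile_set t then st.2.2 else st.2.2 ++ [t])

def compute_matched_missing_alt (profile_skills : List String) (offer_skills : List String) : List String × List String :=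
  let profile_set : PySem.Set String := PySem.Set.ofList (profile_skills.map (fun s => PySem.Str.lower s))
  let st := offer_skills.foldl (pvBStep profile_set) (PySem.Set.empty, [], [])
  (PySem.List.sorted st.2.1 (fun x => x) false, PySem.List.sorted st.2.2 (fun x => x) false)

-- ===== PRECONDITION & SPEC =====
def Spec_compute_matched_missing (profile_skills : List String) (offer_skills : List String) (out : List String × List String) : Prop := out = compute_matched_missing_alt profile_skills offer_skills
instance (profile_skills : List String) (offer_skills : List String) (out : List String × List String) : Decidable (Spec_compute_matched_missing profile_skills offer_skills out) := by unfold Spec_compute_matched_missing; infer_instance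

-- ===== CLAIM (what is proved, stated in full; the proofs are below) =====
def Claim_equal_compute_matched_missing : Prop := ∀ (profile_skills : List String) (offer_skills : List String), Dom_compute_matched_missing profile_skills offer_skills → Spec_compute_matched_missing profile_skills offer_skills (compute_matched_missing profile_skills offer_skills)

-- ===== LEMMAS AND PROOFS =====

-- invariant of B's fold: seen = set of lowered skills so far; matched/missing are its partition by profile membership
theorem pvB_fold_inv (P : PySem.Set String) (l : List String) (S : PySem.Set String) :
    l.foldl (pvBStep P) (S, S.filter (fun t => PySem.Set.contains P t),
                            S.filter (fun t => ! PySem.Set.contains P t)) =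
      (PySem.Set.update S (l.map PySem.Str.lower),
       (PySem.Set.update S (l.map PySem.Str.lower)).filter (fun t => PySem.Set.contains P t),
       (PySem.Set.update S (l.map PySem.Str.lower)).filter (fun t => ! PySem.Set.contains P t)) := by
  induction l generalizing S with
  | nil => simp [PySem.Set.update]
  | cons s rest ih =>
    simp only [List.foldl_cons, List.map_cons, PySem.Set.update_cons]
    simp only [pvBStep]
    by_cases h : PySem.Set.contains S (PySem.Str.lower s) = true
    · have hm : PySem.Str.lower s ∈ S := (PySem.Set.contains_iff _ _).mp h
      have hadd : PySem.Set.add S (PySem.Str.lower s) = S := PySem.Set.add_of_mem hm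
      rw [if_pos h, hadd]
      exact ih S
    · have hm : PySem.Str.lower s ∉ S := fun hx => h ((PySem.Set.contains_iff _ _).mpr hx)
      have hadd : PySem.Set.add S (PySem.Str.lower s) = S ++ [PySem.Str.lower s] :=
        PySem.Set.add_of_not_mem hm
      rw [if_neg h]
      have e1 : (if PySem.Set.contains P (PySem.Str.lower s) = true then
            S.filter (fun t => PySem.Set.contains P t) ++ [PySem.Str.lower s]
          else S.filter (fun t => PySem.Set.contains P t)) =
          (PySem.Set.add S (PySem.Str.lower s)).filter (fun t => PySem.Set.contains P t) := by
        rw [hadd, List.filter_append]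
        by_cases hp : PySem.Set.contains P (PySem.Str.lower s) = true
        · have hpm := (PySem.Set.contains_iff _ _).mp hp
          simp [hpm]
        · have hpm : PySem.Str.lower s ∉ P := fun hx => hp ((PySem.Set.contains_iff _ _).mpr hx)
          simp [hpm]
      have e2 : (if PySem.Set.contains P (PySem.Str.lower s) = true then
            S.filter (fun t => ! PySem.Set.contains P t)
          else S.filter (fun t => ! PySem.Set.contains P t) ++ [PySem.Str.lower s]) =
          (PySem.Set.add S (PySem.Str.lower s)).filter (fun t => ! PySem.Set.contains P t) := by
        rw [hadd, List.filter_append]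
        by_cases hp : PySem.Set.contains P (PySem.Str.lower s) = true
        · have hpm := (PySem.Set.contains_iff _ _).mp hp
          simp [hpm]
        · have hpm : PySem.Str.lower s ∉ P := fun hx => hp ((PySem.Set.contains_iff _ _).mpr hx)
          simp [hpm]
      rw [e1, e2]
      exact ih _

theorem pvB_state (P : PySem.Set String) (l : List String) :
    l.foldl (pvBStep P) (PySem.Set.empty, [], []) =
      (PySem.Set.ofList (l.map PySem.Str.lower),
       (PySem.Set.ofList (l.map PySem.Str.lower)).filter (fun t => PySem.Set.contains P t),
       (PySem.Set.ofList (l.map PySem.Str.lower)).filter (fun t => ! PySem.Set.contains P t)) := by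
  have h := pvB_fold_inv P l PySem.Set.empty
  simpa [PySem.Set.empty, PySem.Set.update, PySem.Set.ofList_eq_foldl] using h

-- ===== VERDICT (by name: the statement is the Claim_ definition above) =====
theorem compute_matched_missing_spec : Claim_equal_compute_matched_missing := by
  intro profile_skills offer_skills _
  unfold Spec_compute_matched_missing compute_matched_missing compute_matched_missing_alt
  set P : PySem.Set String := PySem.Set.ofList (profile_skills.map (fun s => PySem.Str.lower s)) with hP
  set O : PySem.Set String := PySem.Set.ofList (offer_skills.map (fun s => PySem.Str.lower s)) with hO
  dsimp only
  rw [pvB_state]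
  have hPn : P.Nodup := PySem.Set.nodup_ofList _
  have hOn : O.Nodup := PySem.Set.nodup_ofList _
  refine Prod.ext ?_ ?_
  · show PySem.List.sorted (PySem.Set.inter P O) _ false =
        PySem.List.sorted (O.filter (fun t => PySem.Set.contains P t)) _ false
    apply (PySem.List.sorted_id_eq_sorted_id_iff_perm _ _).mpr
    refine (List.perm_ext_iff_of_nodup (PySem.Set.nodup_inter _ _ hPn) (hOn.filter _)).mpr ?_
    intro x
    simp [PySem.Set.mem_inter, List.mem_filter, and_comm]
  · show PySem.List.sorted (PySem.Set.diff O P) _ false =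
        PySem.List.sorted (O.filter (fun t => ! PySem.Set.contains P t)) _ false
    apply (PySem.List.sorted_id_eq_sorted_id_iff_perm _ _).mpr
    refine (List.perm_ext_iff_of_nodup (PySem.Set.nodup_diff _ _ hOn) (hOn.filter _)).mpr ?_
    intro x
    simp [PySem.Set.mem_diff, List.mem_filter]
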